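-- pv_equiv track=rewrite | github.com/OCSPL-IT/oneSource | ACCOUNTS/CASHFLOW/views.py | _page_links
-- ===== SOURCE A (Python) =====
-- def _page_links(current: int, total: int, delta: int = 2):
--     if total <= 12:
--         return list(range(1, total + 1))
--
--     keep = {1, total}
--     for i in range(current - delta, current + delta + 1):
--         if 1 <= i <= total:
--             keep.add(i)
--
--     keep = sorted(keep)
--     out = []
--     prev = None
--     for x in keep:
--         if prev is not None and x - prev > 1:
--             out.append(None)
--         out.append(x)
--         prev = x
--     return out
-- ===== SOURCE B (Python) =====
-- def _page_links(current: int, total: int, delta: int = 2):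
--     if total <= 12:
--         return list(range(1, total + 1))
--     lo = max(2, current - delta)
--     hi = min(total - 1, current + delta)
--     mid = list(range(lo, hi + 1))
--     out = [1]
--     if mid:
--         if mid[0] > 2:
--             out.append(None)
--         out.extend(mid)
--         if mid[-1] < total - 1:
--             out.append(None)
--     else:
--         out.append(None)
--     out.append(total)
--     return out
-- ===== Notes on version B (the rewrite author's own statement) =====
-- stated objective: faster
-- what changed: For total > 12, B builds the result directly as the three segments [1], the window clipped to [2, total-1] via max/min, and [total], deciding each ellipsis by an arithmetic boundary test, instead of A's build-a-keep-set over the window loop + sorted() + neighbour-difference gap detection.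
import Mathlib
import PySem

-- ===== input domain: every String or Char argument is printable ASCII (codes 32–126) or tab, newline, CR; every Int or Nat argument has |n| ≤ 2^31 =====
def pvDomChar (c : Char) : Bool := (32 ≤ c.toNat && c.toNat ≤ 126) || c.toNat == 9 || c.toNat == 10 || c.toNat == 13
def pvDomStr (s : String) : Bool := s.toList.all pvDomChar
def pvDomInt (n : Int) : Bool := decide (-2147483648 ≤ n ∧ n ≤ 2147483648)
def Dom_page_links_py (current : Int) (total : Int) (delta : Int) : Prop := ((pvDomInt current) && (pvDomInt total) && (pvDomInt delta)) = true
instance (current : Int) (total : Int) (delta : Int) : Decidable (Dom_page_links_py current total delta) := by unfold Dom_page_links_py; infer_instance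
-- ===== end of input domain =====

-- B replaces A's set-build + sort + neighbour-difference gap detection by a direct closed-form
-- construction of the three segments [1], clipped window, [total] with arithmetic gap tests.

-- ===== PORT A =====
def page_links_py (current : Int) (total : Int) (delta : Int) : List (Option Int) :=
  if total ≤ 12 then (PySem.List.pyRange 1 (total + 1) 1).map some
  else
    let keep0 : PySem.Set Int := PySem.Set.ofList [1, total]
    let keep : PySem.Set Int :=
      (PySem.List.pyRange (current - delta) (current + delta + 1) 1).foldl
        (fun s i => if 1 ≤ i ∧ i ≤ total then PySem.Set.add s i else s) keep0
    let keepS : List Int := PySem.List.sorted keep (fun x => x) false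
    (keepS.foldl
      (fun (acc : List (Option Int) × Option Int) x =>
        ((match acc.2 with
          | some p => if x - p > 1 then acc.1 ++ [none] else acc.1
          | none => acc.1) ++ [some x], some x))
      ([], none)).1

-- ===== PORT B =====
def page_links_py_alt (current : Int) (total : Int) (delta : Int) : List (Option Int) :=
  if total ≤ 12 then (PySem.List.pyRange 1 (total + 1) 1).map some
  else
    let lo := max 2 (current - delta)
    let hi := min (total - 1) (current + delta)
    let mid := PySem.List.pyRange lo (hi + 1) 1
    let out : List (Option Int) := [some 1]
    let out :=
      match mid with
      | [] => out ++ [none]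
      | m :: _ =>
          let out := if m > 2 then out ++ [none] else out
          let out := out ++ mid.map some
          if PySem.List.pyGetD mid (-1) 0 < total - 1 then out ++ [none] else out
    out ++ [some total]

-- ===== PRECONDITION & SPEC =====
def Spec_page_links_py (current : Int) (total : Int) (delta : Int) (out : List (Option Int)) : Prop := out = page_links_py_alt current total delta
instance (current : Int) (total : Int) (delta : Int) (out : List (Option Int)) : Decidable (Spec_page_links_py current total delta out) := by unfold Spec_page_links_py; infer_instance

-- ===== CLAIM (what is proved, stated in full; the proofs are below) =====
def Claim_equal_page_links_py : Prop := ∀ (current : Int) (total : Int) (delta : Int), Dom_page_links_py current total delta → Spec_page_links_py current total delta (page_links_py current total delta)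

-- ===== LEMMAS AND PROOFS =====

-- A's emit loop over the sorted keep list, as a structural recursion
def pvEmit (p : Option Int) : List Int → List (Option Int)
  | [] => []
  | x :: xs =>
      (match p with
       | some q => if x - q > 1 then [none] else []
       | none => ([] : List (Option Int))) ++ some x :: pvEmit (some x) xs

lemma pvA_foldl (l : List Int) : ∀ (out : List (Option Int)) (p : Option Int),
    (l.foldl
      (fun (acc : List (Option Int) × Option Int) x =>
        ((match acc.2 with
          | some q => if x - q > 1 then acc.1 ++ [none] else acc.1
          | none => acc.1) ++ [some x], some x))
      (out, p)).1 = out ++ pvEmit p l := by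
  induction l with
  | nil => intro out p; simp [pvEmit]
  | cons x xs ih =>
      intro out p
      cases p with
      | none => simp [pvEmit, List.foldl_cons, ih]
      | some q =>
          by_cases h : x - q > 1 <;> simp [pvEmit, List.foldl_cons, ih, h]

-- A's emit over a consecutive run followed by the final page
lemma pvEmit_run (t : Int) : ∀ (n : Nat) (a b p : Int), (b - a).toNat ≤ n → a < b →
    pvEmit (some p) (PySem.List.pyRange a b 1 ++ [t])
      = (if a - p > 1 then [none] else []) ++ (PySem.List.pyRange a b 1).map some
        ++ (if t - (b - 1) > 1 then [none] else []) ++ [some t] := by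
  intro n
  induction n with
  | zero => intro a b p hn hab; omega
  | succ n ih =>
      intro a b p hn hab
      rw [PySem.List.pyRange_one_cons hab]
      by_cases hb : a + 1 < b
      · have ih' := ih (a + 1) b a (by omega) hb
        have h1 : ¬ ((a + 1) - a > 1) := by omega
        rw [if_neg h1, List.nil_append] at ih'
        simp only [pvEmit, List.cons_append, List.map_cons]
        rw [ih']
        by_cases hg : a - p > 1 <;> simp [hg]
      · have hb2 : b = a + 1 := by omega
        subst hb2
        rw [PySem.List.pyRange_one_eq_nil (le_refl (a + 1))]
        have h2 : a + 1 - 1 = a := by omega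
        rw [h2]
        simp only [pvEmit, List.nil_append, List.cons_append, List.map_cons, List.map_nil]
        by_cases hg : a - p > 1 <;> by_cases hg2 : t - a > 1 <;> simp [hg, hg2]

-- membership of A's keep set after the window loop
lemma pvMem_keep_fold (t : Int) :
    ∀ (l : List Int) (s : PySem.Set Int) (y : Int),
    (y ∈ l.foldl (fun s i => if 1 ≤ i ∧ i ≤ t then PySem.Set.add s i else s) s)
      ↔ y ∈ s ∨ (y ∈ l ∧ 1 ≤ y ∧ y ≤ t) := by
  intro l
  induction l with
  | nil => intro s y; simp
  | cons x xs ih =>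
      intro s y
      by_cases h : 1 ≤ x ∧ x ≤ t
      · simp only [List.foldl_cons, if_pos h, ih, PySem.Set.mem_add]
        constructor
        · rintro (⟨hy | rfl⟩ | ⟨hm, hb⟩)
          · exact Or.inl hy
          · exact Or.inr ⟨List.mem_cons_self, h⟩
          · exact Or.inr ⟨List.mem_cons_of_mem _ hm, hb⟩
        · rintro (hy | ⟨hm, hb⟩)
          · exact Or.inl (Or.inl hy)
          · rcases List.mem_cons.mp hm with rfl | hm'
            · exact Or.inl (Or.inr rfl)
            · exact Or.inr ⟨hm', hb⟩
      · simp only [List.foldl_cons, if_neg h, ih]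
        constructor
        · rintro (hy | ⟨hm, hb⟩)
          · exact Or.inl hy
          · exact Or.inr ⟨List.mem_cons_of_mem _ hm, hb⟩
        · rintro (hy | ⟨hm, hb⟩)
          · exact Or.inl hy
          · rcases List.mem_cons.mp hm with rfl | hm'
            · exact absurd hb h
            · exact Or.inr ⟨hm', hb⟩

lemma pvNodup_keep_fold (t : Int) :
    ∀ (l : List Int) (s : PySem.Set Int), s.Nodup →
    (l.foldl (fun s i => if 1 ≤ i ∧ i ≤ t then PySem.Set.add s i else s) s).Nodup := by
  intro l
  induction l with
  | nil => intro s hs; simpa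
  | cons x xs ih =>
      intro s hs
      by_cases h : 1 ≤ x ∧ x ≤ t
      · simpa [List.foldl_cons, if_pos h] using ih _ (PySem.Set.nodup_add s x hs)
      · simpa [List.foldl_cons, if_neg h] using ih _ hs

-- A's sorted keep list is exactly [1] ++ clipped window ++ [total]
lemma pvSorted_keep (c t d : Int) (h13 : 13 ≤ t) :
    PySem.List.sorted
      ((PySem.List.pyRange (c - d) (c + d + 1) 1).foldl
        (fun s i => if 1 ≤ i ∧ i ≤ t then PySem.Set.add s i else s)
        (PySem.Set.ofList [1, t])) (fun x => x) false
    = 1 :: (PySem.List.pyRange (max 2 (c - d)) (min (t - 1) (c + d) + 1) 1 ++ [t]) := by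
  have hpw : (1 :: (PySem.List.pyRange (max 2 (c - d)) (min (t - 1) (c + d) + 1) 1 ++ [t])).Pairwise (· < ·) := by
    apply List.pairwise_cons.mpr
    constructor
    · intro y hy
      rcases List.mem_append.mp hy with hm | hm
      · have := (PySem.List.mem_pyRange_one).mp hm; omega
      · rcases List.mem_singleton.mp hm with rfl; omega
    · apply List.pairwise_append.mpr
      refine ⟨PySem.List.pairwise_lt_pyRange_one _ _, List.pairwise_singleton _ _, ?_⟩
      intro x hx y hy
      have := (PySem.List.mem_pyRange_one).mp hx
      rcases List.mem_singleton.mp hy with rfl; omega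
  apply PySem.List.sorted_eq_of_perm_of_pairwise_lt
  · apply (List.perm_ext_iff_of_nodup ?_ ?_).mpr
    · intro y
      rw [List.mem_cons, List.mem_append, List.mem_singleton,
        PySem.List.mem_pyRange_one, pvMem_keep_fold t]
      simp only [PySem.Set.mem_ofList, PySem.List.mem_pyRange_one, List.mem_cons,
        List.not_mem_nil, or_false]
      omega
    · exact hpw.imp (fun h => ne_of_lt h)
    · exact pvNodup_keep_fold t _ _ (PySem.Set.nodup_ofList [1, t])
  · exact hpw

-- ===== VERDICT (by name: the statement is the Claim_ definition above) =====
theorem page_links_py_spec : Claim_equal_page_links_py := by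
  intro c t d _
  unfold Spec_page_links_py page_links_py page_links_py_alt
  by_cases ht : t ≤ 12
  · simp [ht]
  · simp only [if_neg ht]
    have h13 : 13 ≤ t := by omega
    rw [pvSorted_keep c t d h13, pvA_foldl]
    set lo := max 2 (c - d) with hlo
    set hi := min (t - 1) (c + d) with hhi
    have hlo2 : (2 : Int) ≤ lo := le_max_left _ _
    have hhit : hi ≤ t - 1 := min_le_left _ _
    by_cases hm : lo < hi + 1
    · -- the window contributes at least one page
      have hmidc : PySem.List.pyRange lo (hi + 1) 1 = lo :: PySem.List.pyRange (lo + 1) (hi + 1) 1 :=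
        PySem.List.pyRange_one_cons hm
      have hlast : PySem.List.pyGetD (PySem.List.pyRange lo (hi + 1) 1) (-1) 0 = hi := by
        rw [PySem.List.pyRange_one_succ_right (by omega : lo ≤ hi)]
        exact PySem.List.pyGetD_neg_one_append_singleton _ _ _
      have hrun := pvEmit_run t (hi + 1 - lo).toNat lo (hi + 1) 1 (le_refl _) hm
      have e1 : (lo - (1 : Int) > 1) ↔ (lo > 2) := by omega
      have e2 : (t - (hi + 1 - 1) > 1) ↔ (hi < t - 1) := by omega
      rw [hmidc] at hrun hlast ⊢
      simp only [pvEmit, List.nil_append]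
      rw [hrun, hlast]
      simp only [e1, e2]
      by_cases b1 : lo > 2 <;> by_cases b2 : hi < t - 1 <;> simp [b1, b2]
    · -- empty window: single gap between 1 and total
      have hnil : PySem.List.pyRange lo (hi + 1) 1 = [] :=
        PySem.List.pyRange_one_eq_nil (by omega)
      rw [hnil]
      simp [pvEmit, show (1 : Int) < t - 1 by omega]
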